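-- pv_equiv track=rewrite | github.com/PurdueDualityLab/ReTest | src/re_fuzzer/analysis/cve_analysis.py | analyze_cwe_by_engine
-- ===== SOURCE A (Python) =====
-- from collections import Counter, defaultdict
--
-- MEMORY_SAFETY_CWES = {
--     "CWE-119", "CWE-125", "CWE-787", "CWE-416", "CWE-190", "CWE-476",
--     "CWE-122", "CWE-121", "CWE-120", "CWE-189", "CWE-415", "CWE-674",
-- }
--
-- REDOS_CWES = {
--     "CWE-1333", "CWE-400", "CWE-399",
-- }
--
-- CODE_INJECTION_CWES = {
--     "CWE-94",  # Code Injection (common in PHP regex)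
-- }
--
-- def categorize_cwe(cwe_str):
--     """Categorize a CWE string into Memory Safety, ReDoS, Code Injection, or Other."""
--     if not cwe_str:
--         return "Other"
--
--     cwes = [c.strip() for c in str(cwe_str).split(",")]
--
--     # Check for Memory Safety first (most common)
--     for cwe in cwes:
--         if cwe in MEMORY_SAFETY_CWES:
--             return "Memory Safety"
--
--     # Check for ReDoS
--     for cwe in cwes:
--         if cwe in REDOS_CWES:
--             return "ReDoS"
--
--     # Check for Code Injection
--     for cwe in cwes:
--         if cwe in CODE_INJECTION_CWES:
--             return "Code Injection"
--
--     return "Other"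
--
-- def analyze_cwe_by_engine(engine_cves):
--     """Analyze CWE categories per engine for stacked bar chart."""
--     engine_cwe_types = {}
--
--     for engine, cves in engine_cves.items():
--         type_counts = Counter()
--         for cve in cves:
--             category = categorize_cwe(cve.get("cwe", ""))
--             type_counts[category] += 1
--         engine_cwe_types[engine] = type_counts
--
--     return engine_cwe_types
-- ===== SOURCE B (Python) =====
-- from collections import Counter
--
-- _CWE_RANK = {}
-- for _rank, _group in enumerate([
--     ["CWE-119", "CWE-125", "CWE-787", "CWE-416", "CWE-190", "CWE-476",
--      "CWE-122", "CWE-121", "CWE-120", "CWE-189", "CWE-415", "CWE-674"],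
--     ["CWE-1333", "CWE-400", "CWE-399"],
--     ["CWE-94"],
-- ]):
--     for _cwe in _group:
--         _CWE_RANK[_cwe] = _rank
--
-- _CATEGORIES = ["Memory Safety", "ReDoS", "Code Injection"]
--
-- def categorize_cwe(cwe_str):
--     """Categorize a CWE string by the highest-priority category any of its CWEs hits."""
--     if not cwe_str:
--         return "Other"
--     best = 3
--     for part in str(cwe_str).split(","):
--         best = min(best, _CWE_RANK.get(part.strip(), 3))
--     return _CATEGORIES[best] if best < 3 else "Other"
--
-- def analyze_cwe_by_engine(engine_cves):
--     return {
--         engine: Counter(categorize_cwe(cve.get("cwe", "")) for cve in cves)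
--         for engine, cves in engine_cves.items()
--     }
-- ===== Notes on version B (the rewrite author's own statement) =====
-- stated objective: simpler
-- what changed: Replaces A's three hard-coded category sets and three sequential scans of the parsed CWE list with a single CWE->priority-rank dict and one min-tracking pass, and builds the per-engine counts with a Counter over a generator in a dict comprehension instead of an explicit += loop.
import Mathlib
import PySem

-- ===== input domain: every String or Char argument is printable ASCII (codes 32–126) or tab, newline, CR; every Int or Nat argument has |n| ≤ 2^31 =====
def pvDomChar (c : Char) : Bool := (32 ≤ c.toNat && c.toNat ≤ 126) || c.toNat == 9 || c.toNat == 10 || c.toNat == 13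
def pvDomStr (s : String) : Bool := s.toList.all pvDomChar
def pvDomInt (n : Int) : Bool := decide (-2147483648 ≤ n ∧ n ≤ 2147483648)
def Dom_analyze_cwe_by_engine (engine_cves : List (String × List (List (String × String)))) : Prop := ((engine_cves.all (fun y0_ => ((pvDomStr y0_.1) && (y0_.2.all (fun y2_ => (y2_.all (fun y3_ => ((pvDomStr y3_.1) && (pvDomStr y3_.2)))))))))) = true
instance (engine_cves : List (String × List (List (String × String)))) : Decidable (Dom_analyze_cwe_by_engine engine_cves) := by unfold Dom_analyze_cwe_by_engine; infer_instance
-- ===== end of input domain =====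

-- B replaces A's three priority Sets and three sequential scans of the parsed CWE list by one
-- rank table (CWE → 0/1/2) and a single min-tracking pass; objective: simpler/alternative, not faster.


-- ===== PORT A =====
def MEMORY_SAFETY_CWES : PySem.Set String := PySem.Set.ofList
  ["CWE-119", "CWE-125", "CWE-787", "CWE-416", "CWE-190", "CWE-476",
   "CWE-122", "CWE-121", "CWE-120", "CWE-189", "CWE-415", "CWE-674"]

def REDOS_CWES : PySem.Set String := PySem.Set.ofList ["CWE-1333", "CWE-400", "CWE-399"]

def CODE_INJECTION_CWES : PySem.Set String := PySem.Set.ofList ["CWE-94"]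

def categorize_cwe (cwe_str : String) : String :=
  if cwe_str == "" then "Other"          -- 'if not cwe_str' on a str
  else
    -- cwes = [c.strip() for c in str(cwe_str).split(",")]; sep "," ≠ "" so split? is always some
    let cwes := ((PySem.Str.split? cwe_str ",").getD []).map PySem.Str.strip
    -- 'for cwe in cwes: if cwe in S: return …' three times
    if cwes.any (fun cwe => MEMORY_SAFETY_CWES.contains cwe) then "Memory Safety"
    else if cwes.any (fun cwe => REDOS_CWES.contains cwe) then "ReDoS"
    else if cwes.any (fun cwe => CODE_INJECTION_CWES.contains cwe) then "Code Injection"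
    else "Other"

def analyze_cwe_by_engine (engine_cves : List (String × List (List (String × String)))) : List (String × List (String × Int)) :=
  (engine_cves.foldl
    (fun (acc : PySem.Dict String (List (String × Int))) p =>
      let type_counts := p.2.foldl
        (fun (d : PySem.Dict String Int) cve =>
          d.modify (categorize_cwe ((PySem.Dict.mk cve).getD "cwe" "")) 0 (· + 1))
        PySem.Dict.empty
      acc.insert p.1 type_counts.items)
    PySem.Dict.empty).items

-- ===== PORT B =====
-- _CWE_RANK built in order: the 12 memory-safety CWEs ↦ 0, the 3 ReDoS CWEs ↦ 1, CWE-94 ↦ 2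
def CWE_RANK : PySem.Dict String Int := PySem.Dict.mk
  [("CWE-119", 0), ("CWE-125", 0), ("CWE-787", 0), ("CWE-416", 0), ("CWE-190", 0), ("CWE-476", 0),
   ("CWE-122", 0), ("CWE-121", 0), ("CWE-120", 0), ("CWE-189", 0), ("CWE-415", 0), ("CWE-674", 0),
   ("CWE-1333", 1), ("CWE-400", 1), ("CWE-399", 1), ("CWE-94", 2)]

def CATEGORIES : List String := ["Memory Safety", "ReDoS", "Code Injection"]

def categorize_cwe_alt (cwe_str : String) : String :=
  if cwe_str == "" then "Other"
  else
    let best := ((PySem.Str.split? cwe_str ",").getD []).foldl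
      (fun (b : Int) part => min b (CWE_RANK.getD (PySem.Str.strip part) 3)) 3
    if best < 3 then PySem.List.pyGetD CATEGORIES best "Other" else "Other"

def analyze_cwe_by_engine_alt (engine_cves : List (String × List (List (String × String)))) : List (String × List (String × Int)) :=
  (engine_cves.foldl
    (fun (acc : PySem.Dict String (List (String × Int))) p =>
      acc.insert p.1
        (PySem.Dict.counter (p.2.map (fun cve => categorize_cwe_alt ((PySem.Dict.mk cve).getD "cwe" "")))).items)
    PySem.Dict.empty).items

-- ===== PRECONDITION & SPEC =====
def Spec_analyze_cwe_by_engine (engine_cves : List (String × List (List (String × String)))) (out : List (String × List (String × Int))) : Prop := out = analyze_cwe_by_engine_alt engine_cves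
instance (engine_cves : List (String × List (List (String × String)))) (out : List (String × List (String × Int))) : Decidable (Spec_analyze_cwe_by_engine engine_cves out) := by unfold Spec_analyze_cwe_by_engine; infer_instance

-- ===== CLAIM (what is proved, stated in full; the proofs are below) =====
def Claim_equal_analyze_cwe_by_engine : Prop := ∀ (engine_cves : List (String × List (List (String × String)))), Dom_analyze_cwe_by_engine engine_cves → Spec_analyze_cwe_by_engine engine_cves (analyze_cwe_by_engine engine_cves)

-- ===== LEMMAS AND PROOFS =====

-- rank of a single CWE string in B's table, with a default of 3
def rankOf (c : String) : Int := CWE_RANK.getD c 3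

-- Pointwise: membership in A's three sets is exactly rank 0 / 1 / 2 in B's table.
lemma contains_rank (c : String) :
    MEMORY_SAFETY_CWES.contains c = (rankOf c == 0) ∧
    REDOS_CWES.contains c = (rankOf c == 1) ∧
    CODE_INJECTION_CWES.contains c = (rankOf c == 2) := by
  by_cases h1 : c = "CWE-119"
  · subst h1; decide
  by_cases h2 : c = "CWE-125"
  · subst h2; decide
  by_cases h3 : c = "CWE-787"
  · subst h3; decide
  by_cases h4 : c = "CWE-416"
  · subst h4; decide
  by_cases h5 : c = "CWE-190"
  · subst h5; decide
  by_cases h6 : c = "CWE-476"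
  · subst h6; decide
  by_cases h7 : c = "CWE-122"
  · subst h7; decide
  by_cases h8 : c = "CWE-121"
  · subst h8; decide
  by_cases h9 : c = "CWE-120"
  · subst h9; decide
  by_cases h10 : c = "CWE-189"
  · subst h10; decide
  by_cases h11 : c = "CWE-415"
  · subst h11; decide
  by_cases h12 : c = "CWE-674"
  · subst h12; decide
  by_cases h13 : c = "CWE-1333"
  · subst h13; decide
  by_cases h14 : c = "CWE-400"
  · subst h14; decide
  by_cases h15 : c = "CWE-399"
  · subst h15; decide
  by_cases h16 : c = "CWE-94"
  · subst h16; decide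
  simp [MEMORY_SAFETY_CWES, REDOS_CWES, CODE_INJECTION_CWES, rankOf, CWE_RANK,
        PySem.Dict.getD_eq_get?_getD, PySem.Dict.get?, PySem.Set.ofList, PySem.Set.add,
        beq_iff_eq, h1, Ne.symm h1, h2, Ne.symm h2, h3, Ne.symm h3, h4, Ne.symm h4, h5, Ne.symm h5, h6, Ne.symm h6, h7, Ne.symm h7, h8, Ne.symm h8, h9, Ne.symm h9, h10, Ne.symm h10, h11, Ne.symm h11, h12, Ne.symm h12, h13, Ne.symm h13, h14, Ne.symm h14, h15, Ne.symm h15, h16, Ne.symm h16]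

lemma rank_bounds (c : String) : 0 ≤ rankOf c ∧ rankOf c ≤ 3 := by
  by_cases g1 : c = "CWE-119"
  · subst g1; decide
  by_cases g2 : c = "CWE-125"
  · subst g2; decide
  by_cases g3 : c = "CWE-787"
  · subst g3; decide
  by_cases g4 : c = "CWE-416"
  · subst g4; decide
  by_cases g5 : c = "CWE-190"
  · subst g5; decide
  by_cases g6 : c = "CWE-476"
  · subst g6; decide
  by_cases g7 : c = "CWE-122"
  · subst g7; decide
  by_cases g8 : c = "CWE-121"
  · subst g8; decide
  by_cases g9 : c = "CWE-120"
  · subst g9; decide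
  by_cases g10 : c = "CWE-189"
  · subst g10; decide
  by_cases g11 : c = "CWE-415"
  · subst g11; decide
  by_cases g12 : c = "CWE-674"
  · subst g12; decide
  by_cases g13 : c = "CWE-1333"
  · subst g13; decide
  by_cases g14 : c = "CWE-400"
  · subst g14; decide
  by_cases g15 : c = "CWE-399"
  · subst g15; decide
  by_cases g16 : c = "CWE-94"
  · subst g16; decide
  simp [rankOf, CWE_RANK, PySem.Dict.getD_eq_get?_getD, PySem.Dict.get?,
        beq_iff_eq, Ne.symm g1, Ne.symm g2, Ne.symm g3, Ne.symm g4, Ne.symm g5, Ne.symm g6, Ne.symm g7, Ne.symm g8, Ne.symm g9, Ne.symm g10, Ne.symm g11, Ne.symm g12, Ne.symm g13, Ne.symm g14, Ne.symm g15, Ne.symm g16]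

lemma foldl_min_acc (l : List String) : ∀ b : Int, 0 ≤ b → b ≤ 3 →
    l.foldl (fun (b : Int) c => min b (rankOf c)) b =
      min b (l.foldl (fun (b : Int) c => min b (rankOf c)) 3) := by
  induction l with
  | nil => intro b _ hb; simp; omega
  | cons c t ih =>
    intro b hb0 hb3
    have hc := rank_bounds c
    simp only [List.foldl_cons]
    rw [ih (min b (rankOf c)) (by omega) (by omega), ih (min 3 (rankOf c)) (by omega) (by omega)]
    omega

-- running minimum over ranks, characterised by the three 'any' scans
lemma foldl_min_rank (l : List String) :
    l.foldl (fun (b : Int) c => min b (rankOf c)) 3 =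
      if l.any (fun c => rankOf c == 0) then 0
      else if l.any (fun c => rankOf c == 1) then 1
      else if l.any (fun c => rankOf c == 2) then 2
      else 3 := by
  induction l with
  | nil => simp
  | cons c t ih =>
    have hb := rank_bounds c
    have hacc := foldl_min_acc t (min 3 (rankOf c)) (by omega) (by omega)
    simp only [List.foldl_cons, List.any_cons]
    rw [hacc, ih]
    rcases (show rankOf c = 0 ∨ rankOf c = 1 ∨ rankOf c = 2 ∨ rankOf c = 3 by omega) with h | h | h | h <;>
      simp [h] <;> split_ifs <;> omega

lemma cat_eq (s : String) : categorize_cwe s = categorize_cwe_alt s := by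
  unfold categorize_cwe categorize_cwe_alt
  by_cases h0 : s == ""
  · simp [h0]
  · simp only [h0, Bool.false_eq_true, if_false]
    have key := foldl_min_rank (((PySem.Str.split? s ",").getD []).map PySem.Str.strip)
    rw [List.foldl_map] at key
    simp only [show ∀ c, CWE_RANK.getD c 3 = rankOf c from fun _ => rfl]
    rw [key]
    simp only [show ∀ c, MEMORY_SAFETY_CWES.contains c = (rankOf c == 0) from fun c => (contains_rank c).1,
      show ∀ c, REDOS_CWES.contains c = (rankOf c == 1) from fun c => (contains_rank c).2.1,
      show ∀ c, CODE_INJECTION_CWES.contains c = (rankOf c == 2) from fun c => (contains_rank c).2.2]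
    split_ifs <;> simp_all <;> decide

-- ===== VERDICT (by name: the statement is the Claim_ definition above) =====
theorem analyze_cwe_by_engine_spec : Claim_equal_analyze_cwe_by_engine := by
  intro ec _
  unfold Spec_analyze_cwe_by_engine analyze_cwe_by_engine analyze_cwe_by_engine_alt
  simp only [funext cat_eq, PySem.Dict.counter_eq_foldl, List.foldl_map]
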